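-- pv_equiv track=rewrite | github.com/dingzhen-vape/ModTranslateTool | main.py | sortTheMap
-- ===== SOURCE A (Python) =====
-- def sortTheMap(Map:dict):
--     templist = []
--     for black_str in Black_list:
--         for key,value in Map.items():
--             if key.startswith(black_str):
--                 templist.append(key)
--     for i in templist:
--         Map.pop(i)
--     return Map
--
-- Black_list = ["minecraft:","description.","multiplayer.","gui."]
-- ===== SOURCE B (Python) =====
-- # B: one pass that keeps the non-blacklisted items (dict comprehension), then writes
-- # them back into the same Map object (clear+update), instead of A's one scan per prefix
-- # plus a pop loop. Same in-place mutation, same returned object.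
-- Black_list = ["minecraft:", "description.", "multiplayer.", "gui."]
--
-- def sortTheMap(Map: dict):
--     prefixes = tuple(Black_list)
--     kept = {k: v for k, v in Map.items() if not k.startswith(prefixes)}
--     Map.clear()
--     Map.update(kept)
--     return Map
-- ===== Notes on version B (the rewrite author's own statement) =====
-- stated objective: idiomatic
-- what changed: B replaces A's per-prefix scans plus a pop loop by a single dict-comprehension pass that keeps the non-blacklisted entries and writes them back into the same Map (clear+update); Pre_ restricts the association-list representation to distinct keys, the faithful image of a Python dict.
import Mathlib
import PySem

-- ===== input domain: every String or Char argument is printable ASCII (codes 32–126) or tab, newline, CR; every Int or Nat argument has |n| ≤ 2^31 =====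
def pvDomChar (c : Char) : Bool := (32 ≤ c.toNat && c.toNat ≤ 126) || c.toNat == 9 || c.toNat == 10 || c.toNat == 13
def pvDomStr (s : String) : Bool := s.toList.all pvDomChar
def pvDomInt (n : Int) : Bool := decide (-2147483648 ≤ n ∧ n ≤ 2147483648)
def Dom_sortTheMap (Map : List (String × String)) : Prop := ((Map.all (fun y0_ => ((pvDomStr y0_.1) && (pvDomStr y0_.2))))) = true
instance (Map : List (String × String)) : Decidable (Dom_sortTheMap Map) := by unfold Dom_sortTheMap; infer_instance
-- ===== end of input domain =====

-- B rewrites A's per-prefix scans + pop loop as one filtering pass written back in place;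
-- both A and B mutate the Python Map in place and return it — the equivalence proved here
-- is about the returned value (which is the mutated Map itself in both programs).

-- ===== PORT A =====
def pvBlackList : List String := ["minecraft:", "description.", "multiplayer.", "gui."]

-- Map.pop(i): remove the (unique, under Pre_) entry with key i. Python raises KeyError when
-- the key is absent; that is unreachable here because each popped key was just seen in Map
-- and the four blacklist prefixes are pairwise non-overlapping, so the port's no-op on a
-- missing key is never exercised on inputs a Python dict can present.
def pvPopKey : List (String × String) → String → List (String × String)
  | [], _ => []
  | kv :: rest, k => if kv.1 = k then rest else kv :: pvPopKey rest k

def sortTheMap (Map : List (String × String)) : List (String × String) :=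
  -- templist = []; for black_str in Black_list: for key,value in Map.items(): if key.startswith(black_str): templist.append(key)
  let templist : List String :=
    pvBlackList.foldl (fun acc black_str =>
      Map.foldl (fun acc2 kv =>
        if PySem.Str.startswith kv.1 black_str then acc2 ++ [kv.1] else acc2) acc) []
  -- for i in templist: Map.pop(i)
  templist.foldl (fun m i => pvPopKey m i) Map

-- ===== PORT B =====
-- kept = {k: v for k, v in Map.items() if not k.startswith(prefixes)}; Map.clear(); Map.update(kept); return Map
-- (clear + update of fresh keys leaves exactly the kept items, in order)
def sortTheMap_alt (Map : List (String × String)) : List (String × String) :=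
  Map.filter (fun kv => !(pvBlackList.any (fun p => PySem.Str.startswith kv.1 p)))

-- ===== PRECONDITION & SPEC =====
-- Pre_ restricts the association-list argument to pairwise-distinct keys: these are exactly
-- the lists that represent a Python dict (A's parameter is a dict, whose keys are unique),
-- so Pre_ excludes no input the Python function actually receives.
def Pre_sortTheMap (Map : List (String × String)) : Prop := (Map.map Prod.fst).Nodup
instance (Map : List (String × String)) : Decidable (Pre_sortTheMap Map) := by unfold Pre_sortTheMap; infer_instance

def pvWitness_sortTheMap : (List (String × String)) := [("minecraft:stone", "s"), ("hello", "h"), ("gui.ok", "g")]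

def Spec_sortTheMap (Map : List (String × String)) (out : List (String × String)) : Prop := out = sortTheMap_alt Map
instance (Map : List (String × String)) (out : List (String × String)) : Decidable (Spec_sortTheMap Map out) := by unfold Spec_sortTheMap; infer_instance

-- ===== CLAIM (what is proved, stated in full; the proofs are below) =====
def Claim_equal_sortTheMap : Prop := ∀ (Map : List (String × String)), Dom_sortTheMap Map → Pre_sortTheMap Map → Spec_sortTheMap Map (sortTheMap Map)

-- ===== LEMMAS AND PROOFS =====

-- Under distinct keys, popping a key is filtering it out.
theorem pvPopKey_eq_filter (M : List (String × String)) (k : String)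
    (h : (M.map Prod.fst).Nodup) :
    pvPopKey M k = M.filter (fun kv => !(kv.1 = k : Bool)) := by
  induction M with
  | nil => rfl
  | cons kv rest ih =>
    simp only [List.map_cons, List.nodup_cons] at h
    by_cases hk : kv.1 = k
    · simp only [pvPopKey, if_pos hk]
      rw [List.filter_cons_of_neg (by simp [hk])]
      refine (List.filter_eq_self.2 ?_).symm
      intro x hx
      have hne : x.1 ≠ k := fun hxk => h.1 (hk ▸ hxk ▸ List.mem_map_of_mem hx)
      simp [hne]
    · simp [pvPopKey, hk, ih h.2]

theorem pvPopKey_keys_sublist (M : List (String × String)) (k : String) :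
    ((pvPopKey M k).map Prod.fst).Sublist (M.map Prod.fst) := by
  induction M with
  | nil => simp [pvPopKey]
  | cons kv rest ih =>
    by_cases hk : kv.1 = k
    · simp only [pvPopKey, if_pos hk, List.map_cons]
      exact (List.sublist_cons_self _ _)
    · simp only [pvPopKey, if_neg hk, List.map_cons]
      exact ih.cons₂ _

-- Folding pop over a key list filters out all listed keys (keys distinct).
theorem pvFoldPop_eq_filter (R : List String) (M : List (String × String))
    (h : (M.map Prod.fst).Nodup) :
    R.foldl (fun m i => pvPopKey m i) M = M.filter (fun kv => !(R.contains kv.1)) := by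
  induction R generalizing M with
  | nil => simp
  | cons r R ih =>
    simp only [List.foldl_cons]
    rw [ih _ (h.sublist (pvPopKey_keys_sublist M r)), pvPopKey_eq_filter M r h,
      List.filter_filter]
    apply List.filter_congr
    intro kv _
    by_cases h1 : kv.1 = r <;> simp [h1]

theorem sortTheMap_spec : Claim_equal_sortTheMap := by
  intro Map _ hpre
  unfold Spec_sortTheMap sortTheMap sortTheMap_alt
  show (pvBlackList.foldl (fun acc black_str =>
      Map.foldl (fun acc2 kv =>
        if PySem.Str.startswith kv.1 black_str then acc2 ++ [kv.1] else acc2) acc) []).foldl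
      (fun m i => pvPopKey m i) Map = _
  have hfun : (fun (acc : List String) black_str =>
      Map.foldl (fun acc2 kv =>
        if PySem.Str.startswith kv.1 black_str then acc2 ++ [kv.1] else acc2) acc)
      = (fun acc black_str =>
        acc ++ (Map.filter (fun kv => PySem.Str.startswith kv.1 black_str)).map Prod.fst) := by
    funext acc p
    exact PySem.List.foldl_append_if ..
  rw [hfun, PySem.List.foldl_append_eq_flatMap, List.nil_append,
    pvFoldPop_eq_filter _ _ hpre]
  apply List.filter_congr
  intro kv hkv
  congr 1
  rw [Bool.eq_iff_iff]
  simp only [List.contains_eq_mem, decide_eq_true_eq, List.mem_flatMap, List.mem_map,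
    List.mem_filter, List.any_eq_true]
  constructor
  · rintro ⟨p, hp, ⟨kv', ⟨_, hsw⟩, hfst⟩⟩
    exact ⟨p, hp, hfst ▸ hsw⟩
  · rintro ⟨p, hp, hsw⟩
    exact ⟨p, hp, kv, ⟨hkv, hsw⟩, rfl⟩
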